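-- pv_equiv track=rewrite | github.com/glaserL/tldr | src/tldr/srl/train.py | do_iob2
-- ===== SOURCE A (Python) =====
-- def do_iob2(roles):
--     current_role = None
--     iob2_roles = []
--     for role in roles:
--         if role == "O":
--             iob2_roles.append(role)
--         elif role != current_role:
--             current_role = role
--             iob2_roles.append(f"B-{role}")
--         else:
--             iob2_roles.append(f"I-{role}")
--     return iob2_roles
-- ===== SOURCE B (Python) =====
-- def do_iob2(roles):
--     context = []
--     prev = None
--     for role in roles:
--         context.append(prev)
--         if role != "O":
--             prev = role
--     return [role if role == "O" else
--             (f"B-{role}" if ctx != role else f"I-{role}")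
--             for role, ctx in zip(roles, context)]
-- ===== Notes on version B (the rewrite author's own statement) =====
-- stated objective: alternative
-- what changed: Replaces the single stateful tagging loop by a two-pass decomposition: first build a parallel context list of the last non-'O' role seen strictly before each position, then emit tags by a stateless comprehension over zip(roles, context).
import Mathlib
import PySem

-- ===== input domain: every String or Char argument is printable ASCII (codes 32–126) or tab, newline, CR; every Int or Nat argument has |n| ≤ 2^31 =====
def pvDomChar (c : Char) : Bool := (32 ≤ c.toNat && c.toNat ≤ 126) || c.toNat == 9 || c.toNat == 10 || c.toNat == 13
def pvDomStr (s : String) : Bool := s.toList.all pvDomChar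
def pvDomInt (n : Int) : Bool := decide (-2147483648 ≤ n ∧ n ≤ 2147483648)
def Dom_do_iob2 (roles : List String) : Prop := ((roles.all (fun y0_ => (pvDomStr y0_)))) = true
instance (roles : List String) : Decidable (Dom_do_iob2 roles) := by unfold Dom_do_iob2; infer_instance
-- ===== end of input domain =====

-- B replaces A's single stateful tagging loop by a context-table build plus a stateless mapping pass (objective: alternative decomposition).

-- ===== PORT A =====
-- A's loop: state is current_role (None until a non-'O' role tags B-); three-way branch per element.
def doIob2Go : List String → Option String → List String
  | [], _ => []
  | r :: rs, cur =>
    if r = "O" then r :: doIob2Go rs cur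
    else if some r ≠ cur then ("B-" ++ r) :: doIob2Go rs (some r)
    else ("I-" ++ r) :: doIob2Go rs cur

def do_iob2 (roles : List String) : List String := doIob2Go roles none

-- ===== PORT B =====
-- first pass: context[i] = last non-'O' role strictly before position i (None if none yet)
def iobContext : List String → Option String → List (Option String)
  | [], _ => []
  | r :: rs, prev => prev :: iobContext rs (if r ≠ "O" then some r else prev)

-- second pass: stateless tag for one (role, ctx) pair
def iobTag (p : String × Option String) : String :=
  if p.1 = "O" then p.1
  else if p.2 ≠ some p.1 then "B-" ++ p.1 else "I-" ++ p.1

def do_iob2_alt (roles : List String) : List String :=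
  (roles.zip (iobContext roles none)).map iobTag

-- ===== PRECONDITION & SPEC =====
def Spec_do_iob2 (roles : List String) (out : List String) : Prop := out = do_iob2_alt roles
instance (roles : List String) (out : List String) : Decidable (Spec_do_iob2 roles out) := by unfold Spec_do_iob2; infer_instance

-- ===== CLAIM (what is proved, stated in full; the proofs are below) =====
def Claim_equal_do_iob2 : Prop := ∀ (roles : List String), Dom_do_iob2 roles → Spec_do_iob2 roles (do_iob2 roles)

-- ===== LEMMAS AND PROOFS =====

-- loop invariant: A's tagging scan from state `cur` equals mapping iobTag over the context table started at `cur`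
theorem doIob2Go_eq (roles : List String) :
    ∀ cur : Option String,
      doIob2Go roles cur = (roles.zip (iobContext roles cur)).map iobTag := by
  induction roles with
  | nil => intro cur; rfl
  | cons r rs ih =>
    intro cur
    simp only [doIob2Go, iobContext, List.zip_cons_cons, List.map_cons, iobTag]
    by_cases hO : r = "O"
    · simp [hO, ih]
    · by_cases hc : some r ≠ cur
      · simp [hO, hc, Ne.symm (by simpa using hc), ih]
      · rw [not_not] at hc
        simp [hO, ← hc, ih]

-- ===== VERDICT (by name: the statement is the Claim_ definition above) =====
theorem do_iob2_spec : Claim_equal_do_iob2 := by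
  intro roles _
  unfold Spec_do_iob2 do_iob2 do_iob2_alt
  exact doIob2Go_eq roles none
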